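-- pv_equiv track=rewrite | github.com/wherby/code | contest/00000c397d130/d130/q1/t1.py | satisfiesConditions
-- ===== SOURCE A (Python) =====
-- from typing import List, Tuple, Optional
--
-- def satisfiesConditions(grid: List[List[int]]) -> bool:
--     m,n = len(grid),len(grid[0])
--     for i in range(m):
--         for j in range(n):
--             if i != m-1 and grid[i][j] != grid[i+1][j]:
--                 return False
--             if j != n-1 and grid[i][j] == grid[i][j+1]:
--                 return False
--     return True
-- ===== SOURCE B (Python) =====
-- def satisfiesConditions(grid):
--     columns = list(zip(*grid))
--     columns_ok = all(all(x == col[0] for x in col) for col in columns)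
--     rows_ok = all(all(a != b for a, b in zip(c1, c2))
--                   for c1, c2 in zip(columns, columns[1:]))
--     return columns_ok and rows_ok
-- ===== Notes on version B (the rewrite author's own statement) =====
-- stated objective: alternative
-- what changed: Replaced the cell-by-cell nested index loop with early returns by a transpose (zip(*grid)) followed by two whole-list passes: every column is constant and adjacent columns differ elementwise; Pre_ excludes the empty grid (A raises IndexError) and grids with a row shorter than row 0, where A either raises IndexError or its early False depends on the accidental scan order before the out-of-range access.
-- outside the precondition, e.g. on satisfiesConditions([[1, 1], [1]]): A returns False, B returns True; on satisfiesConditions([[1, 2], [1]]): A raises IndexError, B returns True; on satisfiesConditions([]): A raises IndexError, B returns True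
import Mathlib
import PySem

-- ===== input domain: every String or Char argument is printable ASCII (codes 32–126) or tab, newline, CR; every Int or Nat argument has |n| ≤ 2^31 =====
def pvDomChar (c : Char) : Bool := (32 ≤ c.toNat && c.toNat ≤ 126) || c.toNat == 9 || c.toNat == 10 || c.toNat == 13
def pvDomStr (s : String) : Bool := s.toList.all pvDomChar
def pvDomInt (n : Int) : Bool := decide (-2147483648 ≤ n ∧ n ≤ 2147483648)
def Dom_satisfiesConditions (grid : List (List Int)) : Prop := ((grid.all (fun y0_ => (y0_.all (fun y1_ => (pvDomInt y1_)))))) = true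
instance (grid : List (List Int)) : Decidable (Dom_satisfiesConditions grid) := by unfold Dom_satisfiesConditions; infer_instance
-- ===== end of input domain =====

-- B transposes the grid (zip(*grid)) and checks in two whole-list passes that every
-- column is constant and adjacent columns differ elementwise; A scans cell by cell
-- with an early return.

-- ===== PORT A =====
-- grid[i][j] with Python indexing; defaults are never reached inside Pre_
def pvCellA (grid : List (List Int)) (i j : Int) : Int :=
  PySem.List.pyGetD (PySem.List.pyGetD grid i []) j 0

def pvJLoopA (grid : List (List Int)) (m n i : Int) : List Int → Bool
  | [] => true
  | j :: js =>
    if i ≠ m - 1 ∧ pvCellA grid i j ≠ pvCellA grid (i + 1) j then false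
    else if j ≠ n - 1 ∧ pvCellA grid i j = pvCellA grid i (j + 1) then false
    else pvJLoopA grid m n i js

def pvILoopA (grid : List (List Int)) (m n : Int) : List Int → Bool
  | [] => true
  | i :: is =>
    if pvJLoopA grid m n i (PySem.List.pyRange 0 n 1) then pvILoopA grid m n is
    else false

def satisfiesConditions (grid : List (List Int)) : Bool :=
  let m : Int := grid.length
  let n : Int := (PySem.List.pyGetD grid 0 []).length
  pvILoopA grid m n (PySem.List.pyRange 0 m 1)

-- ===== PORT B =====
-- zip(*grid): the j-th column for j below the shortest row length (Python's zip
-- truncates to the shortest iterable); the getD default is never reached there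
def pvColumnsB (grid : List (List Int)) : List (List Int) :=
  let minLen := ((grid.map List.length).min?).getD 0
  (List.range minLen).map (fun j => grid.map (fun row => row.getD j 0))

def satisfiesConditions_alt (grid : List (List Int)) : Bool :=
  let columns := pvColumnsB grid
  let columnsOk := columns.all (fun col => col.all (fun x => x == PySem.List.pyGetD col 0 0))
  let rowsOk := (columns.zip (PySem.List.slice columns (some 1) none)).all
    (fun p => (p.1.zip p.2).all (fun q => !(q.1 == q.2)))
  columnsOk && rowsOk

-- ===== PRECONDITION & SPEC =====
-- Pre_ excludes the empty grid (A raises IndexError on grid[0]) and grids with a row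
-- SHORTER than row 0: on those A either raises IndexError at the short row or returns
-- an early False that depends on the accidental scan order before the bad access.
def Pre_satisfiesConditions (grid : List (List Int)) : Prop :=
  grid ≠ [] ∧ ∀ row ∈ grid, (grid.headD []).length ≤ row.length
instance (grid : List (List Int)) : Decidable (Pre_satisfiesConditions grid) := by
  unfold Pre_satisfiesConditions; infer_instance

def pvWitness_satisfiesConditions : List (List Int) := [[1, 2], [1, 2]]

def Spec_satisfiesConditions (grid : List (List Int)) (out : Bool) : Prop := out = satisfiesConditions_alt grid
instance (grid : List (List Int)) (out : Bool) : Decidable (Spec_satisfiesConditions grid out) := by unfold Spec_satisfiesConditions; infer_instance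

-- ===== CLAIM (what is proved, stated in full; the proofs are below) =====
def Claim_equal_satisfiesConditions : Prop := ∀ (grid : List (List Int)), Dom_satisfiesConditions grid → Pre_satisfiesConditions grid → Spec_satisfiesConditions grid (satisfiesConditions grid)

-- ===== LEMMAS AND PROOFS =====

lemma pvJLoopA_iff (grid : List (List Int)) (m n i : Int) (js : List Int) :
    pvJLoopA grid m n i js = true ↔
      ∀ j ∈ js,
        ¬(i ≠ m - 1 ∧ pvCellA grid i j ≠ pvCellA grid (i + 1) j) ∧
        ¬(j ≠ n - 1 ∧ pvCellA grid i j = pvCellA grid i (j + 1)) := by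
  induction js with
  | nil => simp [pvJLoopA]
  | cons j js ih =>
    simp only [pvJLoopA, List.mem_cons]
    split_ifs with h1 h2 <;> simp_all

lemma pvILoopA_iff (grid : List (List Int)) (m n : Int) (is : List Int) :
    pvILoopA grid m n is = true ↔
      ∀ i ∈ is, pvJLoopA grid m n i (PySem.List.pyRange 0 n 1) = true := by
  induction is with
  | nil => simp [pvILoopA]
  | cons i is ih =>
    simp only [pvILoopA, List.mem_cons]
    split_ifs with h1 <;> simp_all

-- index form of A
lemma satisfiesConditions_iff (grid : List (List Int)) :
    satisfiesConditions grid = true ↔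
      ∀ i : Int, 0 ≤ i → i < grid.length →
        ∀ j : Int, 0 ≤ j → j < (PySem.List.pyGetD grid 0 []).length →
          ¬(i ≠ (grid.length : Int) - 1 ∧ pvCellA grid i j ≠ pvCellA grid (i + 1) j) ∧
          ¬(j ≠ ((PySem.List.pyGetD grid 0 []).length : Int) - 1 ∧
              pvCellA grid i j = pvCellA grid i (j + 1)) := by
  simp only [satisfiesConditions, pvILoopA_iff, pvJLoopA_iff, PySem.List.mem_pyRange_one]
  constructor
  · intro h i h0 h1 j h2 h3; exact h i ⟨h0, h1⟩ j ⟨h2, h3⟩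
  · intro h i hi j hj; exact h i hi.1 hi.2 j hj.1 hj.2

-- adjacent-pair form of "all over zip with the tail"
lemma zip_tail_all {α : Type} (l : List α) (p : α × α → Bool) :
    ((l.zip (l.drop 1)).all p) = true ↔
      ∀ k : Nat, (h : k + 1 < l.length) → p (l[k], l[k + 1]) = true := by
  have hzlen : (l.zip (l.drop 1)).length = l.length - 1 := by
    simp [List.length_zip]
  rw [List.all_eq_true]
  constructor
  · intro h k hk
    have hkz : k < (l.zip (l.drop 1)).length := by omega
    have := h _ (List.getElem_mem hkz)
    simpa only [List.getElem_zip, List.getElem_drop, Nat.add_comm 1 k] using this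
  · intro h q hq
    obtain ⟨k, hk, hpk⟩ := List.mem_iff_getElem.1 hq
    have := h k (by omega)
    rw [← hpk]
    simpa only [List.getElem_zip, List.getElem_drop, Nat.add_comm 1 k] using this

-- under Pre_, zip(*grid) has exactly (grid.headD []).length columns
lemma pvColumnsB_eq (r : List Int) (rest : List (List Int))
    (hlen : ∀ row ∈ r :: rest, r.length ≤ row.length) :
    pvColumnsB (r :: rest) =
      (List.range r.length).map (fun j => (r :: rest).map (fun row => row.getD j 0)) := by
  have hmin : ((r :: rest).map List.length).min? = some r.length := by
    rw [List.min?_eq_some_iff]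
    constructor
    · exact List.mem_map.2 ⟨r, by simp, rfl⟩
    · intro b hb
      obtain ⟨row, hrow, rfl⟩ := List.mem_map.1 hb
      exact hlen row hrow
  unfold pvColumnsB
  rw [hmin]
  rfl

-- index form of B under Pre_
lemma satisfiesConditions_alt_iff (r : List Int) (rest : List (List Int))
    (hlen : ∀ row ∈ r :: rest, r.length ≤ row.length) :
    satisfiesConditions_alt (r :: rest) = true ↔
      (∀ j < r.length, ∀ row ∈ r :: rest, row.getD j 0 = r.getD j 0) ∧
      (∀ j : Nat, j + 1 < r.length → ∀ row ∈ r :: rest,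
          row.getD j 0 ≠ row.getD (j + 1) 0) := by
  have hslice : ∀ (l : List (List Int)), PySem.List.slice l (some 1) none = l.drop 1 := by
    intro l; rw [PySem.List.slice_from l (by omega)]; simp
  simp only [satisfiesConditions_alt, pvColumnsB_eq r rest hlen, hslice]
  set F : Nat → List Int := fun j => (r :: rest).map (fun row => row.getD j 0) with hF
  have hF0 : ∀ j, PySem.List.pyGetD (F j) 0 0 = r.getD j 0 := by
    intro j
    rw [PySem.List.pyGetD_eq_getElem (F j) 0 le_rfl (by simp [hF])]
    simp [hF]
  have hcols : ∀ j, ((List.range r.length).map F)[j]? = if j < r.length then some (F j) else none := by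
    intro j
    by_cases hj : j < r.length <;> simp [hj]
  rw [Bool.and_eq_true]
  constructor
  · rintro ⟨h1, h2⟩
    constructor
    · intro j hj row hrow
      have hmem : F j ∈ (List.range r.length).map F :=
        List.mem_map.2 ⟨j, List.mem_range.2 hj, rfl⟩
      have := (List.all_eq_true.1 h1) _ hmem
      have hx := (List.all_eq_true.1 this) _ (List.mem_map.2 ⟨row, hrow, rfl⟩)
      rw [hF0] at hx
      exact beq_iff_eq.1 hx
    · intro j hj row hrow
      have hk := (zip_tail_all ((List.range r.length).map F) _).1 h2 j
        (by simpa using hj)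
      have hgj : ((List.range r.length).map F)[j]'(by simpa using (by omega : j < r.length)) = F j := by
        simp
      have hgj1 : ((List.range r.length).map F)[j+1]'(by simpa using hj) = F (j+1) := by
        simp
      rw [hgj, hgj1] at hk
      have := (List.all_eq_true.1 hk) (row.getD j 0, row.getD (j+1) 0)
        (by
          rw [List.zip_map']
          exact List.mem_map.2 ⟨row, hrow, rfl⟩)
      simpa using this
  · rintro ⟨h1, h2⟩
    constructor
    · rw [List.all_eq_true]
      intro col hcol
      obtain ⟨j, hj, rfl⟩ := List.mem_map.1 hcol
      rw [List.mem_range] at hj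
      rw [List.all_eq_true]
      intro x hx
      obtain ⟨row, hrow, rfl⟩ := List.mem_map.1 hx
      rw [hF0]
      exact beq_iff_eq.2 (h1 j hj row hrow)
    · rw [zip_tail_all]
      intro k hk
      have hkn : k + 1 < r.length := by simpa using hk
      have hgj : ((List.range r.length).map F)[k]'(by simpa using (by omega : k < r.length)) = F k := by
        simp
      have hgj1 : ((List.range r.length).map F)[k+1]'(by simpa using hkn) = F (k+1) := by
        simp
      rw [hgj, hgj1, List.all_eq_true]
      intro q hq
      rw [List.zip_map'] at hq
      obtain ⟨row, hrow, rfl⟩ := List.mem_map.1 hq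
      simpa using h2 k hkn row hrow

lemma pvCellA_nat (grid : List (List Int)) (a b : Nat)
    (h1 : a < grid.length) (h2 : b < grid[a].length) :
    pvCellA grid (a : Int) (b : Int) = grid[a][b] := by
  unfold pvCellA
  rw [PySem.List.pyGetD_eq_getElem grid [] (by omega) (by simpa using h1),
      PySem.List.pyGetD_eq_getElem _ 0 (by omega) (by simpa using h2)]
  simp

lemma getD_eq_getElem_int (l : List Int) (j : Nat) (h : j < l.length) :
    l.getD j 0 = l[j] := by
  simp [List.getD, List.getElem?_eq_getElem h]

theorem satisfiesConditions_spec : Claim_equal_satisfiesConditions := by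
  intro grid _ hpre
  obtain ⟨hne, hlen⟩ := hpre
  unfold Spec_satisfiesConditions
  cases grid with
  | nil => exact absurd rfl hne
  | cons r rest =>
  have hlen' : ∀ row ∈ r :: rest, r.length ≤ row.length := by
    simpa using hlen
  rw [Bool.eq_iff_iff, satisfiesConditions_iff, satisfiesConditions_alt_iff r rest hlen']
  have h00 : PySem.List.pyGetD (r :: rest) 0 [] = r := by
    rw [PySem.List.pyGetD_eq_getElem (r :: rest) [] le_rfl (by simp)]; simp
  rw [h00]
  set grid := r :: rest with hgrid
  set n := r.length with hn
  have hge : ∀ (k : Nat) (hk : k < grid.length), n ≤ grid[k].length := by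
    intro k hk; exact hlen' _ (List.getElem_mem hk)
  -- bridge: cell access for in-range nat indices
  have hcell : ∀ (a b : Nat) (ha : a < grid.length), b < n →
      pvCellA grid (a : Int) (b : Int) = grid[a].getD b 0 := by
    intro a b ha hb
    rw [pvCellA_nat grid a b ha (by have := hge a ha; omega),
        getD_eq_getElem_int _ b (by have := hge a ha; omega)]
  constructor
  · -- A-form → B-form
    intro hA
    constructor
    · intro j hj row hrow
      obtain ⟨a, ha, hpa⟩ := List.mem_iff_getElem.1 hrow
      rw [← hpa]
      clear hpa hrow
      induction a with
      | zero => rfl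
      | succ a ih =>
        have ha' : a < grid.length := by omega
        have hcond := (hA (a : Int) (by omega) (by exact_mod_cast ha') (j : Int) (by omega)
          (by exact_mod_cast hj)).1
        have hc : pvCellA grid (a : Int) (j : Int) = pvCellA grid ((a : Int) + 1) (j : Int) := by
          by_contra hcn
          exact hcond ⟨by omega, hcn⟩
        rw [hcell a j ha' hj,
            (by push_cast; ring : ((a : Int) + 1) = ((a + 1 : Nat) : Int)),
            hcell (a + 1) j ha hj] at hc
        rw [← hc]
        exact ih ha'
    · intro j hj row hrow
      obtain ⟨a, ha, hpa⟩ := List.mem_iff_getElem.1 hrow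
      have hcond := (hA (a : Int) (by omega) (by exact_mod_cast ha) (j : Int) (by omega)
        (by exact_mod_cast (by omega : j < n))).2
      have hcne : pvCellA grid (a : Int) (j : Int) ≠ pvCellA grid (a : Int) ((j : Int) + 1) := by
        intro hceq; exact hcond ⟨by omega, hceq⟩
      rw [hcell a j ha (by omega),
          (by push_cast; ring : ((j : Int) + 1) = ((j + 1 : Nat) : Int)),
          hcell a (j + 1) ha hj] at hcne
      rw [← hpa]
      exact hcne
  · -- B-form → A-form
    rintro ⟨hc, hr⟩ i h0 h1 j h2 h3
    obtain ⟨a, rfl⟩ : ∃ a : Nat, i = (a : Int) := ⟨i.toNat, by omega⟩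
    obtain ⟨b, rfl⟩ : ∃ b : Nat, j = (b : Int) := ⟨j.toNat, by omega⟩
    have ha : a < grid.length := by exact_mod_cast h1
    have hb : b < n := by exact_mod_cast h3
    constructor
    · rintro ⟨him, hcne⟩
      apply hcne
      have ha1 : a + 1 < grid.length := by omega
      rw [hcell a b ha hb,
          (by push_cast; ring : ((a : Int) + 1) = ((a + 1 : Nat) : Int)),
          hcell (a + 1) b ha1 hb,
          hc b hb _ (List.getElem_mem ha), hc b hb _ (List.getElem_mem ha1)]
    · rintro ⟨hjm, hceq⟩
      have hb1 : b + 1 < n := by omega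
      apply hr b hb1 grid[a] (List.getElem_mem ha)
      rw [hcell a b ha hb,
          (by push_cast; ring : ((b : Int) + 1) = ((b + 1 : Nat) : Int)),
          hcell a (b + 1) ha hb1] at hceq
      exact hceq
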